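-- pv_equiv track=rewrite | github.com/ericmerle3789/Collatz-Junction-Theorem | scripts/tools/session10f8b_dp_optimized.py | dp_check_target_fast
-- ===== SOURCE A (Python) =====
-- def compute_u(k, p):
--     return (2 * pow(3, -1, p)) % p
--
-- def dp_check_target_fast(k, p, M, target=None):
--     """
--     DP optimisé pour vérifier si target ∈ Im(f) mod p.
--
--     State : reachable[last_B][residue] = True/False
--     Implémenté comme liste de sets (pour la compacité).
--
--     Pour p petit (< 100K) : utilise tableau 2D
--     Pour p moyen (< 5M) : utilise dict de sets avec guard
--
--     Retourne : (has_target: bool, n_residues: int) ou (None, None) si p trop grand.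
--     """
--     if target is None:
--         target = (-1) % p
--
--     u = compute_u(k, p)
--     u_pows = [pow(u, j, p) for j in range(k)]
--     n_vars = k - 1
--
--     # Guard : si p trop grand, skip
--     if p > 2_000_000:
--         return None, None
--
--     # Précalculer les termes coeff * 2^b mod p pour chaque (j, b)
--     # Pour chaque couche j, coeff = u^(j+1)
--     # add_vals[b] = coeff * 2^b mod p
--
--     # Layer 0 : variable B_1
--     coeff = u_pows[1]
--     current = [set() for _ in range(M + 1)]
--     for b in range(M + 1):
--         val = (coeff * pow(2, b, p)) % p
--         current[b].add(val)
--
--     # Layers 1 to n_vars-1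
--     for layer in range(1, n_vars):
--         j = layer + 1  # index dans u_pows
--         coeff = u_pows[j]
--
--         # Précalculer add_vals
--         add_vals = [(coeff * pow(2, b, p)) % p for b in range(M + 1)]
--
--         new_current = [set() for _ in range(M + 1)]
--
--         # Optimisation : accumuler les résidus "héritables"
--         # Pour un nouveau b, on peut hériter de tous last_b ≤ b.
--         # Donc on accumule au fur et à mesure.
--         accumulated = set()
--         for b in range(M + 1):
--             # Ajouter les résidus de current[b] à l'accumulation
--             accumulated.update(current[b])
--             # Pour ce b comme nouveau choix, les résidus atteignables sont :
--             add_val = add_vals[b]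
--             for r in accumulated:
--                 new_current[b].add((r + add_val) % p)
--
--         # Guard mémoire
--         total = sum(len(s) for s in new_current)
--         if total > 10_000_000:
--             return None, None
--
--         current = new_current
--
--     # Collecter tous les résidus finaux
--     all_residues = set()
--     for s in current:
--         all_residues.update(s)
--
--     return target in all_residues, len(all_residues)
-- ===== SOURCE B (Python) =====
-- # Same result, different state: instead of A's list of per-last-exponent residue sets,
-- # keep one dict residue -> minimal last exponent b; layers update this compressed map.
-- def dp_check_target_fast(k, p, M, target=None):
--     if target is None:
--         target = (-1) % p
--     u = (2 * pow(3, -1, p)) % p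
--     if p > 2_000_000:
--         return None, None
--
--     # layer 0: residue -> smallest exponent b attaining it
--     cur = {}
--     coeff = u
--     for b in range(M + 1):
--         r = (coeff * pow(2, b, p)) % p
--         if r not in cur:
--             cur[r] = b
--
--     for _ in range(1, k - 1):
--         # memory guard: number of (last_b, residue) states of the next layer,
--         # i.e. sum over b of |{residues with min exponent <= b}|
--         total = sum(M + 1 - mb for mb in cur.values())
--         if total > 10_000_000:
--             return None, None
--         coeff = (coeff * u) % p
--         add_vals = [(coeff * pow(2, b, p)) % p for b in range(M + 1)]
--         new = {}
--         for r, mb in cur.items():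
--             for b in range(mb, M + 1):
--                 s = (r + add_vals[b]) % p
--                 nb = new.get(s)
--                 if nb is None or b < nb:
--                     new[s] = b
--         cur = new
--
--     return target in cur, len(cur)
-- ===== Notes on version B (the rewrite author's own statement) =====
-- stated objective: alternative
-- what changed: Replaces A's per-layer list of per-last-exponent residue sets (rebuilt each layer through an accumulating union with per-b image sets) by a single dict residue -> minimal last exponent; each layer updates that compressed map with a min-keeping loop over its items, and the memory guard becomes a closed-form sum over the dict's values.
import Mathlib
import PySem

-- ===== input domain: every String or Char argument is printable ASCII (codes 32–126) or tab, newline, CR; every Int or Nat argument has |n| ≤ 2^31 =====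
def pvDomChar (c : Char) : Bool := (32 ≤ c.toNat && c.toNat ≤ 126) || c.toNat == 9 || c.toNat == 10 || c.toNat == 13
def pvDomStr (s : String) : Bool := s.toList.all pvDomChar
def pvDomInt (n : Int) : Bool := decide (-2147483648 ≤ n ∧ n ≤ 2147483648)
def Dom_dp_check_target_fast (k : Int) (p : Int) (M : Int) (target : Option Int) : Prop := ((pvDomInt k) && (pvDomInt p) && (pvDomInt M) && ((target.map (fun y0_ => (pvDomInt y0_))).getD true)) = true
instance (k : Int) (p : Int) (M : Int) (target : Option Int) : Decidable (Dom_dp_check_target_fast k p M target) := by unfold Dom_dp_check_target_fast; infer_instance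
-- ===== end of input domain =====

-- B replaces A's per-layer list of per-last-exponent residue sets by one dict residue → minimal
-- last exponent (alternative state representation, same O(k·M·p) cost); return values only.

-- ===== PORT A =====
-- pow(a, -1, p): the modular inverse reduced by Python's '%' — exact whenever p ≠ 0 and gcd(a, p) = 1
-- (the inputs Pre_ admits); both Pythons call this builtin.
def pyInvMod (a p : Int) : Int := PySem.Int.mod (Int.gcdA a p) p

def compute_u (k p : Int) : Int := PySem.Int.mod (2 * pyInvMod 3 p) p

-- the body of A's per-layer loop: accumulated set of inheritable residues, new_current built per b
def stepA (p M : Int) (add_vals : List Int) (current : List (PySem.Set Int)) :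
    List (PySem.Set Int) :=
  ((PySem.List.pyRange 0 (M + 1) 1).foldl
    (fun (st : PySem.Set Int × List (PySem.Set Int)) b =>
      let acc := PySem.Set.update st.1 (PySem.List.pyGetD current b [])
      (acc, st.2 ++ [PySem.Set.ofList
        (acc.map (fun r => PySem.Int.mod (r + PySem.List.pyGetD add_vals b 0) p))]))
    (PySem.Set.empty, [])).2

def dp_check_target_fast (k : Int) (p : Int) (M : Int) (target : Option Int) :
    Option Bool × Option Int :=
  let target := target.getD (PySem.Int.mod (-1) p)
  let u := compute_u k p
  let u_pows := (PySem.List.pyRange 0 k 1).map (fun j => PySem.Int.powMod u j.toNat p)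
  let n_vars := k - 1
  if 2000000 < p then (none, none)
  else
    let coeff := PySem.List.pyGetD u_pows 1 0
    let current := (PySem.List.pyRange 0 (M + 1) 1).map (fun b =>
      PySem.Set.add PySem.Set.empty (PySem.Int.mod (coeff * PySem.Int.powMod 2 b.toNat p) p))
    match (PySem.List.pyRange 1 n_vars 1).foldl
        (fun (st : Option (List (PySem.Set Int))) layer =>
          match st with
          | none => none
          | some current =>
            let j := layer + 1
            let coeff := PySem.List.pyGetD u_pows j 0
            let add_vals := (PySem.List.pyRange 0 (M + 1) 1).map (fun b =>
              PySem.Int.mod (coeff * PySem.Int.powMod 2 b.toNat p) p)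
            let new_current := stepA p M add_vals current
            let total := (new_current.map (fun s => (s.length : Int))).sum
            if 10000000 < total then none else some new_current)
        (some current) with
    | none => (none, none)
    | some current =>
      let all_residues := current.foldl (fun s cs => PySem.Set.update s cs) PySem.Set.empty
      (some (PySem.Set.contains all_residues target), some ((all_residues.length : Int)))

-- ===== PORT B =====
-- the body of B's per-layer loop: min-keeping update of the residue → min-exponent dict
def stepB (p M : Int) (add_vals : List Int) (cur : PySem.Dict Int Int) : PySem.Dict Int Int :=
  cur.items.foldl (fun nd rm =>
    (PySem.List.pyRange rm.2 (M + 1) 1).foldl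
      (fun (nd : PySem.Dict Int Int) b =>
        let s := PySem.Int.mod (rm.1 + PySem.List.pyGetD add_vals b 0) p
        match nd.get? s with
        | none => nd.insert s b
        | some nb => if b < nb then nd.insert s b else nd) nd)
    PySem.Dict.empty

def dp_check_target_fast_alt (k : Int) (p : Int) (M : Int) (target : Option Int) :
    Option Bool × Option Int :=
  let target := target.getD (PySem.Int.mod (-1) p)
  let u := PySem.Int.mod (2 * pyInvMod 3 p) p
  if 2000000 < p then (none, none)
  else
    let cur0 := (PySem.List.pyRange 0 (M + 1) 1).foldl
      (fun (d : PySem.Dict Int Int) b =>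
        let r := PySem.Int.mod (u * PySem.Int.powMod 2 b.toNat p) p
        if d.contains r then d else d.insert r b)
      PySem.Dict.empty
    match (PySem.List.pyRange 1 (k - 1) 1).foldl
        (fun (st : Option (Int × PySem.Dict Int Int)) _ =>
          match st with
          | none => none
          | some (coeff, cur) =>
            let total := (cur.values.map (fun mb => M + 1 - mb)).sum
            if 10000000 < total then none
            else
              let coeff' := PySem.Int.mod (coeff * u) p
              let add_vals := (PySem.List.pyRange 0 (M + 1) 1).map (fun b =>
                PySem.Int.mod (coeff' * PySem.Int.powMod 2 b.toNat p) p)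
              some (coeff', stepB p M add_vals cur))
        (some (u, cur0)) with
    | none => (none, none)
    | some st => (some (st.2.contains target), some ((st.2.size : Int)))

-- ===== PRECONDITION & SPEC =====
-- Pre_ excludes exactly the inputs where A raises: p = 0 (ZeroDivisionError), 3 ∣ p
-- (pow(3,-1,p) ValueError), and k < 2 when p ≤ 2000000 (IndexError at u_pows[1]).
def Pre_dp_check_target_fast (k : Int) (p : Int) (M : Int) (target : Option Int) : Prop :=
  p ≠ 0 ∧ PySem.Int.mod p 3 ≠ 0 ∧ (2000000 < p ∨ 2 ≤ k)
instance (k : Int) (p : Int) (M : Int) (target : Option Int) :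
    Decidable (Pre_dp_check_target_fast k p M target) := by
  unfold Pre_dp_check_target_fast; infer_instance

def pvWitness_dp_check_target_fast : Int × Int × Int × Option Int := (3, 5, 2, none)

def Spec_dp_check_target_fast (k : Int) (p : Int) (M : Int) (target : Option Int)
    (out : Option Bool × Option Int) : Prop := out = dp_check_target_fast_alt k p M target
instance (k : Int) (p : Int) (M : Int) (target : Option Int) (out : Option Bool × Option Int) :
    Decidable (Spec_dp_check_target_fast k p M target out) := by
  unfold Spec_dp_check_target_fast; infer_instance

-- ===== CLAIM (what is proved, stated in full; the proofs are below) =====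
def Claim_equal_dp_check_target_fast : Prop := ∀ (k : Int) (p : Int) (M : Int) (target : Option Int), Dom_dp_check_target_fast k p M target → Pre_dp_check_target_fast k p M target → Spec_dp_check_target_fast k p M target (dp_check_target_fast k p M target)


-- ===== LEMMAS AND PROOFS =====

-- canonical representative of Python's '%' by p
def pvCanon (p r : Int) : Prop := (0 < p → 0 ≤ r ∧ r < p) ∧ (p < 0 → p < r ∧ r ≤ 0)

lemma canon_mod (p a : Int) (hp : p ≠ 0) : pvCanon p (PySem.Int.mod a p) := by
  constructor
  · intro h; exact ⟨PySem.Int.mod_nonneg a h, PySem.Int.mod_lt a h⟩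
  · intro h; exact PySem.Int.mod_neg_bounds a h

lemma dvd_sub_mod (p a : Int) : p ∣ (a - PySem.Int.mod a p) := by
  have h := PySem.Int.floordiv_mul_add_mod a p
  exact ⟨PySem.Int.floordiv a p, by linarith⟩

lemma canon_inj {p r r' : Int} (hp : p ≠ 0) (h : pvCanon p r) (h' : pvCanon p r')
    (hd : p ∣ (r - r')) : r = r' := by
  obtain ⟨c, hc⟩ := hd
  rcases lt_or_gt_of_ne hp with hneg | hpos
  · have b1 := h.2 hneg; have b2 := h'.2 hneg
    rcases lt_trichotomy c 0 with h0 | h0 | h0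
    · nlinarith
    · subst h0; simp at hc; omega
    · nlinarith
  · have b1 := h.1 hpos; have b2 := h'.1 hpos
    rcases lt_trichotomy c 0 with h0 | h0 | h0
    · nlinarith
    · subst h0; simp at hc; omega
    · nlinarith

lemma mod_congr {p a b : Int} (hp : p ≠ 0) (hd : p ∣ (a - b)) :
    PySem.Int.mod a p = PySem.Int.mod b p := by
  refine canon_inj hp (canon_mod p a hp) (canon_mod p b hp) ?_
  have h1 := dvd_sub_mod p a
  have h2 := dvd_sub_mod p b
  have : PySem.Int.mod a p - PySem.Int.mod b p =
      (a - b) - (a - PySem.Int.mod a p) + (b - PySem.Int.mod b p) := by ring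
  rw [this]
  exact dvd_add (dvd_sub hd h1) h2

lemma mod_idem (p a : Int) (hp : p ≠ 0) :
    PySem.Int.mod (PySem.Int.mod a p) p = PySem.Int.mod a p := by
  refine canon_inj hp (canon_mod _ _ hp) (canon_mod _ _ hp) ?_
  have h := dvd_sub_mod p (PySem.Int.mod a p)
  have e : PySem.Int.mod (PySem.Int.mod a p) p - PySem.Int.mod a p =
      -(PySem.Int.mod a p - PySem.Int.mod (PySem.Int.mod a p) p) := by ring
  rw [e]; exact dvd_neg.mpr h

lemma mod_mul_left {p : Int} (hp : p ≠ 0) (a b : Int) :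
    PySem.Int.mod (PySem.Int.mod a p * b) p = PySem.Int.mod (a * b) p := by
  refine mod_congr hp ?_
  have h := dvd_sub_mod p a
  have : PySem.Int.mod a p * b - a * b = -((a - PySem.Int.mod a p) * b) := by ring
  rw [this]
  exact dvd_neg.mpr (h.mul_right b)

-- least-index semantics of A's layer state and the dict invariant
def minIdx (cur : List (PySem.Set Int)) (r : Int) : Option Int :=
  ((List.range cur.length).find? (fun b => decide (r ∈ cur.getD b []))).map
    (fun b => (Nat.cast b : Int))

def InvLD (p M : Int) (cur : List (PySem.Set Int)) (d : PySem.Dict Int Int) : Prop :=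
  cur.length = (M + 1).toNat ∧
  (∀ s ∈ cur, s.Nodup ∧ ∀ r ∈ s, pvCanon p r) ∧
  d.keys.Nodup ∧
  (∀ r : Int, d.get? r = minIdx cur r)

-- find? over an initial range: first index satisfying q
lemma find?_range_some {L n : Nat} {q : Nat → Bool} :
    (List.range L).find? q = some n ↔ n < L ∧ q n ∧ ∀ m < n, ¬ q m := by
  induction L generalizing n with
  | zero => simp
  | succ L ih =>
    rw [List.range_succ, List.find?_append]
    cases hf : (List.range L).find? q with
    | none =>
      have hnone : ∀ m < L, ¬ q m := by
        intro m hm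
        exact (List.find?_eq_none.mp hf) m (List.mem_range.mpr hm)
      simp only [Option.or, List.find?]
      cases hq : q L with
      | false =>
        constructor
        · intro h; simp at h
        · rintro ⟨h1, h2, h3⟩
          rcases Nat.lt_succ_iff_lt_or_eq.mp h1 with h | h
          · exact absurd h2 (hnone n h)
          · subst h; rw [hq] at h2; simp at h2
      | true =>
        constructor
        · intro h
          have : n = L := by simpa using h.symm
          subst this
          exact ⟨Nat.lt_succ_self _, hq, hnone⟩
        · rintro ⟨h1, h2, h3⟩
          rcases Nat.lt_succ_iff_lt_or_eq.mp h1 with h | h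
          · exact absurd h2 (hnone n h)
          · subst h; rfl
    | some m =>
      obtain ⟨hm1, hm2, hm3⟩ := ih.mp hf
      simp only [Option.or]
      constructor
      · intro h
        have : m = n := by simpa using h
        subst this
        exact ⟨Nat.lt_succ_of_lt hm1, hm2, hm3⟩
      · rintro ⟨h1, h2, h3⟩
        have hnm : ¬ n < m := fun hlt => (hm3 n hlt) h2
        have hmn : ¬ m < n := fun hlt => (h3 m hlt) hm2
        have : m = n := by omega
        subst this; rfl

lemma find?_range_none {L : Nat} {q : Nat → Bool} :
    (List.range L).find? q = none ↔ ∀ m < L, ¬ q m := by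
  rw [List.find?_eq_none]
  constructor
  · intro h m hm; exact h m (List.mem_range.mpr hm)
  · intro h m hm; exact h m (List.mem_range.mp hm)

-- prefix unions of A's per-b sets
def accTo (cur : List (PySem.Set Int)) (n : Nat) : PySem.Set Int :=
  (cur.take n).foldl (fun s cs => PySem.Set.update s cs) PySem.Set.empty

lemma mem_accTo {cur : List (PySem.Set Int)} {n : Nat} {r : Int} :
    r ∈ accTo cur n ↔ ∃ b < n, r ∈ cur.getD b [] := by
  induction n with
  | zero => simp [accTo]
  | succ n ih =>
    unfold accTo
    rw [List.take_succ, List.foldl_append]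
    cases hn : cur[n]? with
    | none =>
      have hlen : cur.length ≤ n := by
        by_contra h
        have h2 : n < cur.length := by omega
        rw [List.getElem?_eq_getElem h2] at hn
        simp at hn
      simp only [Option.toList, List.foldl]
      rw [show ((cur.take n).foldl (fun s cs => PySem.Set.update s cs) PySem.Set.empty) = accTo cur n from rfl]
      rw [ih]
      constructor
      · rintro ⟨b, hb, hm⟩; exact ⟨b, by omega, hm⟩
      · rintro ⟨b, hb, hm⟩
        refine ⟨b, ?_, hm⟩
        rcases Nat.lt_or_ge b n with h | h
        · exact h
        · exfalso
          rw [List.getD_eq_getElem?_getD, List.getElem?_eq_none (by omega)] at hm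
          simp at hm
    | some cs =>
      simp only [Option.toList, List.foldl]
      rw [show ((cur.take n).foldl (fun s cs => PySem.Set.update s cs) PySem.Set.empty) = accTo cur n from rfl]
      rw [PySem.Set.mem_update, ih]
      have hn' : n < cur.length := by
        by_contra h
        rw [List.getElem?_eq_none (by omega)] at hn
        simp at hn
      constructor
      · rintro (⟨b, hb, hm⟩ | hm)
        · exact ⟨b, by omega, hm⟩
        · refine ⟨n, by omega, ?_⟩
          rw [List.getD_eq_getElem?_getD, hn]; exact hm
      · rintro ⟨b, hb, hm⟩
        rcases Nat.lt_or_ge b n with h | h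
        · exact Or.inl ⟨b, h, hm⟩
        · have : b = n := by omega
          subst this
          rw [List.getD_eq_getElem?_getD, hn] at hm
          exact Or.inr hm

lemma nodup_accTo (cur : List (PySem.Set Int)) (n : Nat) : (accTo cur n).Nodup := by
  unfold accTo
  induction (cur.take n) using List.reverseRecOn with
  | nil => simp
  | append_singleton xs x ih =>
    rw [List.foldl_append]
    exact PySem.Set.nodup_update _ _ ih

lemma accTo_succ (cur : List (PySem.Set Int)) (n : Nat) :
    accTo cur (n + 1) = PySem.Set.update (accTo cur n) (PySem.List.pyGetD cur (n : Int) []) := by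
  unfold accTo
  rw [List.take_succ, List.foldl_append, PySem.List.pyGetD_natCast]
  cases hn : cur[n]? with
  | none =>
    have hle : cur.length ≤ n := by
      by_contra h
      have h2 : n < cur.length := by omega
      rw [List.getElem?_eq_getElem h2] at hn
      simp at hn
    simp [List.getD_eq_getElem?_getD, hn, PySem.Set.update_nil]
  | some cs =>
    simp [List.getD_eq_getElem?_getD, hn]

lemma stepA_aux (p : Int) (av : List Int) (cur : List (PySem.Set Int)) (L : Nat) :
    ((List.map (fun k => (Nat.cast k : Int)) (List.range L)).foldl
      (fun (st : PySem.Set Int × List (PySem.Set Int)) b =>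
        let acc := PySem.Set.update st.1 (PySem.List.pyGetD cur b [])
        (acc, st.2 ++ [PySem.Set.ofList
          (acc.map (fun r => PySem.Int.mod (r + PySem.List.pyGetD av b 0) p))]))
      (PySem.Set.empty, []))
    = (accTo cur L, (List.range L).map (fun b =>
        PySem.Set.ofList ((accTo cur (b + 1)).map
          (fun r => PySem.Int.mod (r + PySem.List.pyGetD av (b : Int) 0) p)))) := by
  induction L with
  | zero => simp [accTo]
  | succ L ih =>
    rw [List.range_succ, List.map_append, List.foldl_append, ih]
    simp only [List.foldl, List.range_succ, List.map_append]
    refine Prod.ext ?_ ?_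
    · exact (accTo_succ cur L).symm
    · simp [accTo_succ]

-- closed form of A's layer body
lemma stepA_eq (p M : Int) (av : List Int) (cur : List (PySem.Set Int)) :
    stepA p M av cur = (List.range (M + 1).toNat).map (fun b =>
      PySem.Set.ofList ((accTo cur (b + 1)).map
        (fun r => PySem.Int.mod (r + PySem.List.pyGetD av (b : Int) 0) p))) := by
  unfold stepA
  rw [PySem.List.pyRange_zero, stepA_aux]

-- B's min-keeping dict update, as a fold over single events
def updMin (nd : PySem.Dict Int Int) (e : Int × Int) : PySem.Dict Int Int :=
  match nd.get? e.1 with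
  | none => nd.insert e.1 e.2
  | some nb => if e.2 < nb then nd.insert e.1 e.2 else nd

def omin (o : Option Int) (b : Int) : Option Int :=
  some (match o with | none => b | some nb => if b < nb then b else nb)

lemma stepB_eq (p M : Int) (av : List Int) (d : PySem.Dict Int Int) :
    stepB p M av d = (d.items.flatMap (fun rm => (PySem.List.pyRange rm.2 (M + 1) 1).map
      (fun b => (PySem.Int.mod (rm.1 + PySem.List.pyGetD av b 0) p, b)))).foldl updMin
      PySem.Dict.empty := by
  unfold stepB
  rw [List.foldl_flatMap]
  simp only [List.foldl_map]
  rfl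

lemma get?_updMin (nd : PySem.Dict Int Int) (e : Int × Int) (s : Int) :
    (updMin nd e).get? s = if e.1 = s then omin (nd.get? s) e.2 else nd.get? s := by
  by_cases hs : e.1 = s
  · subst hs
    cases hg : nd.get? e.1 with
    | none => simp [updMin, hg, PySem.Dict.get?_insert, omin]
    | some nb =>
      by_cases hb : e.2 < nb
      · simp [updMin, hg, hb, PySem.Dict.get?_insert, omin]
      · simp [updMin, hg, hb, omin]
  · cases hg : nd.get? e.1 with
    | none => simp [updMin, hg, PySem.Dict.get?_insert, hs, Ne.symm hs]
    | some nb =>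
      by_cases hb : e.2 < nb
      · simp [updMin, hg, hb, PySem.Dict.get?_insert, hs, Ne.symm hs]
      · simp [updMin, hg, hb, hs]

lemma get?_foldl_updMin (evs : List (Int × Int)) (d0 : PySem.Dict Int Int) (s : Int) :
    (evs.foldl updMin d0).get? s =
      ((evs.filter (fun e => e.1 == s)).map (fun e => e.2)).foldl omin (d0.get? s) := by
  induction evs generalizing d0 with
  | nil => rfl
  | cons e rest ih =>
    rw [List.foldl_cons, ih, get?_updMin]
    by_cases hs : e.1 = s
    · simp [List.filter_cons, hs]
    · simp [List.filter_cons, hs]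

lemma nodup_keys_foldl_updMin (evs : List (Int × Int)) (d0 : PySem.Dict Int Int)
    (h : d0.keys.Nodup) : (evs.foldl updMin d0).keys.Nodup := by
  induction evs generalizing d0 with
  | nil => exact h
  | cons e rest ih =>
    refine ih _ ?_
    unfold updMin
    cases nd : d0.get? e.1 with
    | none => exact PySem.Dict.nodup_keys_insert d0 e.1 e.2 h
    | some nb =>
      by_cases hb : e.2 < nb
      · simpa [hb] using PySem.Dict.nodup_keys_insert d0 e.1 e.2 h
      · simpa [hb] using h

lemma foldl_omin_eq_min? (bs : List Int) (o0 : Option Int) :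
    bs.foldl omin o0 = (o0.toList ++ bs).min? := by
  induction bs generalizing o0 with
  | nil => cases o0 <;> simp
  | cons b bs ih =>
    rw [List.foldl_cons, ih]
    cases o0 with
    | none => simp [omin]
    | some nb =>
      simp only [omin, Option.toList, List.cons_append, List.nil_append, List.singleton_append]
      have he : (if b < nb then b else nb) = min nb b := by
        rw [Int.min_def]; split_ifs <;> omega
      rw [he, List.min?_cons, List.min?_cons, List.min?_cons]
      cases hm : bs.min? with
      | none => simp
      | some m => simp [min_assoc]

-- the two layer bodies and their none-absorption
def bodyA (u_pows : List Int) (p M : Int) :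
    Option (List (PySem.Set Int)) → Int → Option (List (PySem.Set Int)) :=
  fun st layer =>
    match st with
    | none => none
    | some current =>
      let j := layer + 1
      let coeff := PySem.List.pyGetD u_pows j 0
      let add_vals := (PySem.List.pyRange 0 (M + 1) 1).map (fun b =>
        PySem.Int.mod (coeff * PySem.Int.powMod 2 b.toNat p) p)
      let new_current := stepA p M add_vals current
      let total := (new_current.map (fun s => (s.length : Int))).sum
      if 10000000 < total then none else some new_current

def bodyB (u p M : Int) :
    Option (Int × PySem.Dict Int Int) → Int → Option (Int × PySem.Dict Int Int) :=
  fun st _ =>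
    match st with
    | none => none
    | some (coeff, cur) =>
      let total := (cur.values.map (fun mb => M + 1 - mb)).sum
      if 10000000 < total then none
      else
        let coeff' := PySem.Int.mod (coeff * u) p
        let add_vals := (PySem.List.pyRange 0 (M + 1) 1).map (fun b =>
          PySem.Int.mod (coeff' * PySem.Int.powMod 2 b.toNat p) p)
        some (coeff', stepB p M add_vals cur)

lemma foldl_bodyA_none (u_pows : List Int) (p M : Int) (l : List Int) :
    l.foldl (bodyA u_pows p M) none = none := by
  induction l with
  | nil => rfl
  | cons x xs ih => simpa [bodyA] using ih

lemma foldl_bodyB_none (u p M : Int) (l : List Int) :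
    l.foldl (bodyB u p M) none = none := by
  induction l with
  | nil => rfl
  | cons x xs ih => simpa [bodyB] using ih


-- consequences of the invariant
lemma inv_get?_some {p M : Int} {cur : List (PySem.Set Int)} {d : PySem.Dict Int Int}
    (h : InvLD p M cur d) {r m : Int} :
    d.get? r = some m ↔ ∃ n : Nat, m = (n : Int) ∧ n < cur.length ∧ r ∈ cur.getD n [] ∧
      ∀ j < n, r ∉ cur.getD j [] := by
  rw [h.2.2.2 r]
  unfold minIdx
  constructor
  · intro hm
    obtain ⟨n, hn, he⟩ := Option.map_eq_some_iff.mp hm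
    obtain ⟨h1, h2, h3⟩ := find?_range_some.mp hn
    exact ⟨n, he.symm, h1, of_decide_eq_true h2,
      fun j hj hm' => h3 j hj (decide_eq_true hm')⟩
  · rintro ⟨n, he, h1, h2, h3⟩
    rw [Option.map_eq_some_iff]
    exact ⟨n, find?_range_some.mpr ⟨h1, decide_eq_true h2,
      fun j hj hq => h3 j hj (of_decide_eq_true hq)⟩, he.symm⟩

lemma inv_mem_getD_length {cur : List (PySem.Set Int)} {n : Nat} {r : Int}
    (hm : r ∈ cur.getD n []) : n < cur.length := by
  by_contra h
  rw [List.getD_eq_getElem?_getD, List.getElem?_eq_none (by omega)] at hm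
  simp at hm

lemma inv_bounds {p M : Int} {cur : List (PySem.Set Int)} {d : PySem.Dict Int Int}
    (h : InvLD p M cur d) {r m : Int} (hm : d.get? r = some m) :
    0 ≤ m ∧ m < M + 1 := by
  obtain ⟨n, he, h1, _, _⟩ := (inv_get?_some h).mp hm
  subst he
  have := h.1
  constructor
  · positivity
  · omega

lemma inv_mem_acc {p M : Int} {cur : List (PySem.Set Int)} {d : PySem.Dict Int Int}
    (h : InvLD p M cur d) {r : Int} {b : Nat} :
    r ∈ accTo cur (b + 1) ↔ ∃ m : Int, d.get? r = some m ∧ m ≤ (b : Int) := by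
  rw [mem_accTo]
  constructor
  · rintro ⟨bb, hbb, hm⟩
    have hlt : bb < cur.length := inv_mem_getD_length hm
    -- the least index n ≤ bb exists
    have hne : ((List.range cur.length).find? (fun j => decide (r ∈ cur.getD j []))) ≠ none := by
      intro hnone
      exact (find?_range_none.mp hnone) bb hlt (decide_eq_true hm)
    obtain ⟨n, hn⟩ := Option.ne_none_iff_exists'.mp hne
    obtain ⟨h1, h2, h3⟩ := find?_range_some.mp hn
    refine ⟨(n : Int), ?_, ?_⟩
    · exact (inv_get?_some h).mpr ⟨n, rfl, h1, of_decide_eq_true h2,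
        fun j hj hm' => h3 j hj (decide_eq_true hm')⟩
    · by_contra hgt
      have : bb < n := by omega
      exact h3 bb this (decide_eq_true hm)
  · rintro ⟨m, hm, hle⟩
    obtain ⟨n, he, h1, h2, _⟩ := (inv_get?_some h).mp hm
    exact ⟨n, by omega, h2⟩

lemma inv_items {p M : Int} {cur : List (PySem.Set Int)} {d : PySem.Dict Int Int}
    (h : InvLD p M cur d) {r m : Int} :
    (r, m) ∈ d.items ↔ d.get? r = some m :=
  (PySem.Dict.get?_eq_some_iff_mem_items d r m h.2.2.1).symm

lemma inv_canon_acc {p M : Int} {cur : List (PySem.Set Int)} {d : PySem.Dict Int Int}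
    (h : InvLD p M cur d) {r : Int} {n : Nat} (hm : r ∈ accTo cur n) : pvCanon p r := by
  obtain ⟨b, _, hb⟩ := mem_accTo.mp hm
  have hlt : b < cur.length := inv_mem_getD_length hb
  have hset : cur.getD b [] ∈ cur := by
    rw [List.getD_eq_getElem?_getD, List.getElem?_eq_getElem hlt]
    exact List.getElem_mem hlt
  exact (h.2.1 _ hset).2 r hb

-- membership in A's new b-th set, expressed on B's dict
lemma memNew_iff {p M : Int} {cur : List (PySem.Set Int)} {d : PySem.Dict Int Int}
    (h : InvLD p M cur d) (av : List Int) {b : Nat} (hb : b < (M + 1).toNat) (s : Int) :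
    s ∈ (stepA p M av cur).getD b [] ↔
      ∃ rm ∈ d.items, rm.2 ≤ (b : Int) ∧
        s = PySem.Int.mod (rm.1 + PySem.List.pyGetD av (b : Int) 0) p := by
  rw [stepA_eq]
  rw [List.getD_eq_getElem?_getD, List.getElem?_map,
    List.getElem?_range hb]
  simp only [Option.map_some, Option.getD_some, PySem.Set.mem_ofList, List.mem_map]
  constructor
  · rintro ⟨r, hr, he⟩
    obtain ⟨m, hm, hle⟩ := (inv_mem_acc h).mp hr
    exact ⟨(r, m), (inv_items h).mpr hm, hle, he.symm⟩
  · rintro ⟨rm, hrm, hle, he⟩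
    exact ⟨rm.1, (inv_mem_acc h).mpr ⟨rm.2, (inv_items h).mp hrm, hle⟩, he.symm⟩

-- membership in B's event minima pool
lemma mem_bs {p M : Int} {d : PySem.Dict Int Int} (av : List Int) (s x : Int) :
    x ∈ ((d.items.flatMap (fun rm => (PySem.List.pyRange rm.2 (M + 1) 1).map
        (fun b => (PySem.Int.mod (rm.1 + PySem.List.pyGetD av b 0) p, b)))).filter
        (fun e => e.1 == s)).map (fun e => e.2) ↔
      ∃ rm ∈ d.items, rm.2 ≤ x ∧ x < M + 1 ∧
        s = PySem.Int.mod (rm.1 + PySem.List.pyGetD av x 0) p := by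
  simp only [List.mem_map, List.mem_filter, List.mem_flatMap, PySem.List.mem_pyRange_one,
    beq_iff_eq]
  constructor
  · rintro ⟨e, ⟨⟨rm, hrm, ⟨b, ⟨hb1, hb2⟩, he⟩⟩, hes⟩, hex⟩
    subst he
    simp only at hes hex
    subst hex
    exact ⟨rm, hrm, hb1, hb2, hes.symm⟩
  · rintro ⟨rm, hrm, h1, h2, he⟩
    exact ⟨(PySem.Int.mod (rm.1 + PySem.List.pyGetD av x 0) p, x),
      ⟨⟨rm, hrm, ⟨x, ⟨h1, h2⟩, rfl⟩⟩, he.symm⟩, rfl⟩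

-- B's dict after a step looks up the least reachable exponent of A's new layer
lemma step_get? {p M : Int} {cur : List (PySem.Set Int)} {d : PySem.Dict Int Int}
    (h : InvLD p M cur d) (av : List Int) (s : Int) :
    (stepB p M av d).get? s = minIdx (stepA p M av cur) s := by
  have hlen : (stepA p M av cur).length = (M + 1).toNat := by
    rw [stepA_eq]; simp
  rw [stepB_eq, get?_foldl_updMin, PySem.Dict.get?_empty, foldl_omin_eq_min?]
  simp only [Option.toList, List.nil_append]
  unfold minIdx
  rw [hlen]
  cases hf : (List.range (M + 1).toNat).find?
      (fun b => decide (s ∈ (stepA p M av cur).getD b [])) with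
  | none =>
    have hnone := find?_range_none.mp hf
    simp only [Option.map_none]
    rw [List.min?_eq_none_iff, List.eq_nil_iff_forall_not_mem]
    intro x hx
    obtain ⟨rm, hrm, h1, h2, he⟩ := (mem_bs av s x).mp hx
    have hx0 : 0 ≤ x := le_trans (inv_bounds h ((inv_items h).mp hrm)).1 h1
    have hxl : x.toNat < (M + 1).toNat := by omega
    have hxe : ((x.toNat : Nat) : Int) = x := Int.toNat_of_nonneg hx0
    refine (hnone x.toNat hxl) (decide_eq_true ?_)
    refine (memNew_iff h av hxl s).mpr ⟨rm, hrm, ?_, ?_⟩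
    · rw [hxe]; exact h1
    · rw [hxe]; exact he
  | some n =>
    obtain ⟨h1, h2, h3⟩ := find?_range_some.mp hf
    simp only [Option.map_some]
    rw [List.min?_eq_some_iff]
    constructor
    · obtain ⟨rm, hrm, hle, he⟩ := (memNew_iff h av h1 s).mp (of_decide_eq_true h2)
      refine (mem_bs av s (n : Int)).mpr ⟨rm, hrm, hle, ?_, he⟩
      omega
    · intro y hy
      obtain ⟨rm, hrm, hy1, hy2, hye⟩ := (mem_bs av s y).mp hy
      have hy0 : 0 ≤ y := le_trans (inv_bounds h ((inv_items h).mp hrm)).1 hy1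
      have hyl : y.toNat < (M + 1).toNat := by omega
      have hye' : ((y.toNat : Nat) : Int) = y := Int.toNat_of_nonneg hy0
      have hmem : s ∈ (stepA p M av cur).getD y.toNat [] := by
        refine (memNew_iff h av hyl s).mpr ⟨rm, hrm, ?_, ?_⟩
        · rw [hye']; exact hy1
        · rw [hye']; exact hye
      by_contra hgt
      have hlt : y.toNat < n := by omega
      exact h3 y.toNat hlt (decide_eq_true hmem)

-- the per-layer step preserves the invariant
lemma step_rel {p M : Int} (hp : p ≠ 0) (av : List Int) {cur : List (PySem.Set Int)}
    {d : PySem.Dict Int Int} (h : InvLD p M cur d) :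
    InvLD p M (stepA p M av cur) (stepB p M av d) := by
  refine ⟨?_, ?_, ?_, ?_⟩
  · rw [stepA_eq]; simp
  · intro t ht
    rw [stepA_eq] at ht
    obtain ⟨b, _, he⟩ := List.mem_map.mp ht
    subst he
    refine ⟨PySem.Set.nodup_ofList _, ?_⟩
    intro r hr
    simp only [PySem.Set.mem_ofList, List.mem_map] at hr
    obtain ⟨r', _, he⟩ := hr
    subst he
    exact canon_mod p _ hp
  · rw [stepB_eq]
    exact nodup_keys_foldl_updMin _ _ (by simp [PySem.Dict.keys_empty])
  · exact fun s => step_get? h av s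


lemma sum_range_indicator (L : Nat) (m : Int) (h0 : 0 ≤ m) :
    ((List.range L).map (fun (b : Nat) => if m ≤ (b : Int) then (1 : Int) else 0)).sum =
      if m ≤ (L : Int) then (L : Int) - m else 0 := by
  induction L with
  | zero => simp; omega
  | succ L ih =>
    rw [List.range_succ, List.map_append, List.sum_append, ih]
    simp only [List.map_cons, List.map_nil, List.sum_cons, List.sum_nil]
    push_cast
    split_ifs <;> omega

lemma sum_filter_items (L : Nat) (items : List (Int × Int))
    (hb : ∀ rm ∈ items, 0 ≤ rm.2 ∧ rm.2 < (L : Int)) :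
    ((List.range L).map (fun (b : Nat) =>
      ((items.filter (fun rm => decide (rm.2 ≤ (b : Int)))).length : Int))).sum =
    (items.map (fun rm => (L : Int) - rm.2)).sum := by
  induction items with
  | nil => simp
  | cons x items ih =>
    have hx := hb x (List.mem_cons_self)
    have hrest : ∀ rm ∈ items, 0 ≤ rm.2 ∧ rm.2 < (L : Int) :=
      fun rm hm => hb rm (List.mem_cons_of_mem x hm)
    have hfun : (fun b : Nat =>
        (((x :: items).filter (fun rm => decide (rm.2 ≤ (b : Int)))).length : Int)) =
        (fun b : Nat => (if x.2 ≤ (b : Int) then (1 : Int) else 0) +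
          ((items.filter (fun rm => decide (rm.2 ≤ (b : Int)))).length : Int)) := by
      funext b
      rw [List.filter_cons]
      split_ifs with h1 h2 h3
      · rw [List.length_cons]; push_cast; ring
      · exact absurd (of_decide_eq_true (by simpa using h1)) h2
      · exact absurd (decide_eq_true h3) (by simpa using h1)
      · simp
    rw [hfun, PySem.List.sum_map_add_int, ih hrest, sum_range_indicator L x.2 hx.1]
    rw [if_pos (by omega)]
    simp

lemma nodup_filtered_keys {d : PySem.Dict Int Int} (hnd : d.keys.Nodup)
    (q : Int × Int → Bool) : ((d.items.filter q).map (fun rm => rm.1)).Nodup := by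
  have hsub : (d.items.filter q).Sublist d.items := List.filter_sublist
  exact List.Sublist.nodup (List.Sublist.map _ hsub) hnd

-- the memory guards agree
lemma totals_eq {p M : Int} (hp : p ≠ 0) (av : List Int) {cur : List (PySem.Set Int)}
    {d : PySem.Dict Int Int} (h : InvLD p M cur d) :
    ((stepA p M av cur).map (fun s => (s.length : Int))).sum =
      (d.values.map (fun mb => M + 1 - mb)).sum := by
  have hL : ∀ b : Nat, (PySem.Set.ofList ((accTo cur (b + 1)).map
      (fun r => PySem.Int.mod (r + PySem.List.pyGetD av (b : Int) 0) p))).length =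
      (d.items.filter (fun rm => decide (rm.2 ≤ (b : Int)))).length := by
    intro b
    have hnodup_map : ((accTo cur (b + 1)).map
        (fun r => PySem.Int.mod (r + PySem.List.pyGetD av (b : Int) 0) p)).Nodup := by
      refine List.Nodup.map_on ?_ (nodup_accTo cur (b + 1))
      intro x hx y hy hxy
      refine canon_inj hp (inv_canon_acc h hx) (inv_canon_acc h hy) ?_
      have h1 := dvd_sub_mod p (x + PySem.List.pyGetD av (b : Int) 0)
      have h2 := dvd_sub_mod p (y + PySem.List.pyGetD av (b : Int) 0)
      have he : x - y =
          (x + PySem.List.pyGetD av (b : Int) 0 -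
            PySem.Int.mod (x + PySem.List.pyGetD av (b : Int) 0) p) -
          (y + PySem.List.pyGetD av (b : Int) 0 -
            PySem.Int.mod (y + PySem.List.pyGetD av (b : Int) 0) p) := by
        rw [hxy]; ring
      rw [he]
      exact dvd_sub h1 h2
    rw [PySem.Set.ofList_eq_self_of_nodup _ hnodup_map, List.length_map]
    have hperm : (accTo cur (b + 1)).Perm
        ((d.items.filter (fun rm => decide (rm.2 ≤ (b : Int)))).map (fun rm => rm.1)) := by
      rw [List.perm_ext_iff_of_nodup (nodup_accTo cur (b + 1))
        (nodup_filtered_keys h.2.2.1 _)]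
      intro r
      rw [inv_mem_acc h]
      constructor
      · rintro ⟨m, hm, hle⟩
        exact List.mem_map.mpr ⟨(r, m), List.mem_filter.mpr
          ⟨(inv_items h).mpr hm, decide_eq_true hle⟩, rfl⟩
      · intro hr
        obtain ⟨rm, hrm, he⟩ := List.mem_map.mp hr
        obtain ⟨hmem, hle⟩ := List.mem_filter.mp hrm
        exact ⟨rm.2, he ▸ (inv_items h).mp hmem, of_decide_eq_true hle⟩
    rw [hperm.length_eq, List.length_map]
  have hbounds : ∀ rm ∈ d.items, 0 ≤ rm.2 ∧ rm.2 < ((M + 1).toNat : Int) := by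
    intro rm hrm
    have hb := inv_bounds h ((inv_items h).mp (show (rm.1, rm.2) ∈ d.items from hrm))
    omega
  rw [stepA_eq, List.map_map]
  rw [List.map_congr_left (fun b _ => by
    show ((PySem.Set.ofList _).length : Int) = _
    rw [hL b])]
  rw [sum_filter_items _ _ hbounds]
  show _ = ((d.items.map (fun rm => rm.2)).map (fun mb => M + 1 - mb)).sum
  rw [List.map_map]
  refine congrArg List.sum (List.map_congr_left ?_)
  intro rm hrm
  have hb := hbounds rm hrm
  show ((M + 1).toNat : Int) - rm.2 = M + 1 - rm.2
  omega

-- the final collection agrees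
lemma final_eq {p M : Int} (hp : p ≠ 0) {cur : List (PySem.Set Int)} {d : PySem.Dict Int Int}
    (h : InvLD p M cur d) (t : Int) :
    (PySem.Set.contains (cur.foldl (fun s cs => PySem.Set.update s cs) PySem.Set.empty) t
        = d.contains t) ∧
    ((cur.foldl (fun s cs => PySem.Set.update s cs) PySem.Set.empty).length = d.size) := by
  have hall : cur.foldl (fun s cs => PySem.Set.update s cs) PySem.Set.empty = accTo cur cur.length := by
    unfold accTo
    rw [List.take_length]
  have hmem : ∀ r : Int, r ∈ accTo cur cur.length ↔ (d.get? r).isSome := by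
    intro r
    rw [mem_accTo]
    constructor
    · rintro ⟨b, hb, hm⟩
      have hlt : b < cur.length := inv_mem_getD_length hm
      obtain ⟨m, hm'⟩ := Option.ne_none_iff_exists'.mp (show d.get? r ≠ none by
        intro hnone
        rw [h.2.2.2 r] at hnone
        unfold minIdx at hnone
        rw [Option.map_eq_none_iff] at hnone
        exact (find?_range_none.mp hnone) b hlt (decide_eq_true hm))
      simp [hm']
    · intro hs
      obtain ⟨m, hm⟩ := Option.isSome_iff_exists.mp hs
      obtain ⟨n, he, h1, h2, _⟩ := (inv_get?_some h).mp hm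
      exact ⟨n, h1, h2⟩
  constructor
  · rw [hall, PySem.Dict.contains_eq_isSome_get?]
    cases hs : (d.get? t).isSome with
    | true =>
      exact (PySem.Set.contains_iff _ _).mpr ((hmem t).mpr hs)
    | false =>
      rw [Bool.eq_false_iff]
      intro hc
      have := (hmem t).mp ((PySem.Set.contains_iff _ _).mp hc)
      rw [hs] at this
      exact Bool.false_ne_true this
  · rw [hall]
    have hperm : (accTo cur cur.length).Perm d.keys := by
      rw [List.perm_ext_iff_of_nodup (nodup_accTo cur cur.length) h.2.2.1]
      intro r
      rw [hmem r]
      constructor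
      · intro hs
        by_contra hk
        rw [← PySem.Dict.get?_eq_none_iff_not_mem_keys] at hk
        rw [hk] at hs
        exact Bool.false_ne_true hs
      · intro hk
        cases hs : d.get? r with
        | none => exact absurd ((PySem.Dict.get?_eq_none_iff_not_mem_keys d r).mp hs) (by simpa using hk)
        | some m => simp
    rw [hperm.length_eq]
    show (d.items.map (fun p => p.1)).length = d.size
    rw [List.length_map]
    rfl


lemma find?_congr_mem {α : Type} (l : List α) (p q : α → Bool) (h : ∀ a ∈ l, p a = q a) :
    l.find? p = l.find? q := by
  induction l with
  | nil => rfl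
  | cons x xs ih =>
    rw [List.find?_cons, List.find?_cons, h x List.mem_cons_self]
    cases q x with
    | true => rfl
    | false => exact ih (fun a ha => h a (List.mem_cons_of_mem x ha))

lemma foldIfAbsent_get? (v : Int → Int) (L : Nat) (r : Int) :
    ((List.map (fun k => (Nat.cast k : Int)) (List.range L)).foldl
      (fun (d : PySem.Dict Int Int) b => if d.contains (v b) then d else d.insert (v b) b)
      PySem.Dict.empty).get? r =
    ((List.range L).find? (fun (n : Nat) => v (Nat.cast n : Int) == r)).map (fun n => (Nat.cast n : Int)) := by
  induction L generalizing r with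
  | zero => rfl
  | succ L ih =>
    rw [List.range_succ, List.map_append, List.foldl_append, List.find?_append]
    simp only [List.foldl, List.map_cons, List.map_nil]
    by_cases hc : (((List.map (fun k => (Nat.cast k : Int)) (List.range L)).foldl
        (fun (d : PySem.Dict Int Int) b =>
          if d.contains (v b) then d else d.insert (v b) b)
        PySem.Dict.empty)).contains (v (L : Int))
    · rw [if_pos hc]
      cases hfL : (List.range L).find? (fun (n : Nat) => v (Nat.cast n : Int) == r) with
      | some m => rw [ih r, hfL]; rfl
      | none =>
        by_cases hr : v (L : Int) = r
        · exfalso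
          rw [PySem.Dict.contains_eq_isSome_get?, ih (v (L : Int))] at hc
          cases hfv : (List.range L).find? (fun (n : Nat) => v (Nat.cast n : Int) == v (L : Int)) with
          | none => rw [hfv] at hc; simp at hc
          | some m =>
            obtain ⟨h1, h2, _⟩ := find?_range_some.mp hfv
            have : (List.range L).find? (fun (n : Nat) => v (Nat.cast n : Int) == r) ≠ none := by
              intro hn
              exact (find?_range_none.mp hn) m h1 (by rw [← hr]; exact h2)
            exact this hfL
        · rw [ih r, hfL]
          simp only [Option.map_none, List.find?]
          have : (v (L : Int) == r) = false := by simpa using hr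
          rw [this]
          rfl
    · rw [if_neg hc]
      by_cases hr : r = v (L : Int)
      · have hfL : (List.range L).find? (fun (n : Nat) => v (Nat.cast n : Int) == r) = none := by
          rw [find?_range_none]
          intro m hm hq
          rw [PySem.Dict.contains_eq_isSome_get?, ih (v (L : Int))] at hc
          have : (List.range L).find? (fun (n : Nat) => v (Nat.cast n : Int) == v (L : Int)) ≠ none := by
            intro hn
            refine (find?_range_none.mp hn) m hm ?_
            rw [show v (m : Int) = r from by simpa using hq, hr]
            simp
          cases hfv : (List.range L).find? (fun (n : Nat) => v (Nat.cast n : Int) == v (L : Int)) with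
          | none => exact absurd hfv this
          | some m' => rw [hfv] at hc; simp at hc
        rw [PySem.Dict.get?_insert, if_pos hr, hfL]
        simp only [Option.none_or, List.find?]
        have : (v (L : Int) == r) = true := by simpa using hr.symm
        rw [this]
        rfl
      · rw [PySem.Dict.get?_insert, if_neg hr, ih r]
        cases hfL : (List.range L).find? (fun (n : Nat) => v (Nat.cast n : Int) == r) with
        | some m => rfl
        | none =>
          simp only [Option.map_none, Option.none_or, List.find?]
          have : (v (L : Int) == r) = false := by
            simpa using fun he => hr he.symm
          rw [this]
          rfl

lemma foldIfAbsent_nodup (v : Int → Int) (L : Nat) :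
    ((List.map (fun k => (Nat.cast k : Int)) (List.range L)).foldl
      (fun (d : PySem.Dict Int Int) b => if d.contains (v b) then d else d.insert (v b) b)
      PySem.Dict.empty).keys.Nodup := by
  induction L with
  | zero => simp [PySem.Dict.keys_empty]
  | succ L ih =>
    rw [List.range_succ, List.map_append, List.foldl_append]
    simp only [List.foldl, List.map_cons, List.map_nil]
    split_ifs with hc
    · exact ih
    · exact PySem.Dict.nodup_keys_insert _ _ _ ih

-- layer-0 states satisfy the invariant
lemma init_rel {p M : Int} (hp : p ≠ 0) (v : Int → Int) (hv : ∀ b, pvCanon p (v b)) :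
    InvLD p M ((PySem.List.pyRange 0 (M + 1) 1).map (fun b =>
        PySem.Set.add PySem.Set.empty (v b)))
      ((PySem.List.pyRange 0 (M + 1) 1).foldl (fun d b =>
        if d.contains (v b) then d else d.insert (v b) b) PySem.Dict.empty) := by
  have hA : (PySem.List.pyRange 0 (M + 1) 1).map (fun b =>
      PySem.Set.add PySem.Set.empty (v b)) =
      (List.range (M + 1).toNat).map (fun n =>
        PySem.Set.add PySem.Set.empty (v (Nat.cast n : Int))) := by
    rw [PySem.List.pyRange_zero, List.map_map]
    rfl
  have hgetD : ∀ n : Nat, n < (M + 1).toNat →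
      ((List.range (M + 1).toNat).map (fun n =>
        PySem.Set.add PySem.Set.empty (v (Nat.cast n : Int)))).getD n [] =
      PySem.Set.add PySem.Set.empty (v (Nat.cast n : Int)) := by
    intro n hn
    rw [List.getD_eq_getElem?_getD, List.getElem?_map, List.getElem?_range hn]
    rfl
  have hsing : ∀ x : Int, PySem.Set.add PySem.Set.empty x = [x] := fun x => rfl
  refine ⟨?_, ?_, ?_, ?_⟩
  · rw [hA]; simp
  · intro t ht
    rw [hA] at ht
    obtain ⟨n, _, he⟩ := List.mem_map.mp ht
    subst he
    rw [hsing]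
    exact ⟨List.nodup_singleton _, fun r hr => by
      rw [List.mem_singleton] at hr
      subst hr
      exact hv _⟩
  · rw [PySem.List.pyRange_zero]
    exact foldIfAbsent_nodup v (M + 1).toNat
  · intro r
    conv_lhs => rw [PySem.List.pyRange_zero]
    rw [foldIfAbsent_get? v (M + 1).toNat r]
    unfold minIdx
    rw [hA]
    have hlen : ((List.range (M + 1).toNat).map (fun n =>
        PySem.Set.add PySem.Set.empty (v (Nat.cast n : Int)))).length = (M + 1).toNat := by
      rw [List.length_map, List.length_range]
    rw [hlen]
    refine congrArg _ (find?_congr_mem _ _ _ ?_).symm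
    intro n hn
    rw [hgetD n (List.mem_range.mp hn), hsing, Bool.eq_iff_iff]
    simp only [beq_iff_eq, decide_eq_true_eq, List.mem_singleton]
    exact eq_comm

def RelAB (p M : Int) (o1 : Option (List (PySem.Set Int)))
    (o2 : Option (Int × PySem.Dict Int Int)) : Prop :=
  (o1 = none ∧ o2 = none) ∨
  ∃ cur c d, o1 = some cur ∧ o2 = some (c, d) ∧ InvLD p M cur d

lemma loop_rel (u p M : Int) (u_pows : List Int) (k : Int) (hp : p ≠ 0)
    (hup : ∀ j : Int, 0 ≤ j → j < k →
      PySem.List.pyGetD u_pows j 0 = PySem.Int.mod (u ^ j.toNat) p) :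
    ∀ (n : Nat) (l : Int), 1 ≤ l → l + n = k - 1 →
    ∀ cur d coeff, InvLD p M cur d → coeff = PySem.Int.mod (u ^ l.toNat) p →
    RelAB p M ((PySem.List.pyRange l (k - 1) 1).foldl (bodyA u_pows p M) (some cur))
      ((PySem.List.pyRange l (k - 1) 1).foldl (bodyB u p M) (some (coeff, d))) := by
  intro n
  induction n with
  | zero =>
    intro l hl hsum cur d coeff hinv hc
    rw [PySem.List.pyRange_one_eq_nil (by omega)]
    exact Or.inr ⟨cur, coeff, d, rfl, rfl, hinv⟩
  | succ n ih =>
    intro l hl hsum cur d coeff hinv hc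
    have hlt : l < k - 1 := by omega
    rw [PySem.List.pyRange_one_cons hlt, List.foldl_cons, List.foldl_cons]
    have hj : PySem.List.pyGetD u_pows (l + 1) 0 = PySem.Int.mod (u ^ (l + 1).toNat) p :=
      hup (l + 1) (by omega) (by omega)
    have hcoeff' : PySem.Int.mod (coeff * u) p = PySem.Int.mod (u ^ (l + 1).toNat) p := by
      rw [hc, mod_mul_left hp]
      congr 1
      rw [show (l + 1).toNat = l.toNat + 1 by omega, pow_succ]
    have hA1 : bodyA u_pows p M (some cur) l
        = if 10000000 < ((stepA p M ((PySem.List.pyRange 0 (M + 1) 1).map (fun b =>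
            PySem.Int.mod (PySem.List.pyGetD u_pows (l + 1) 0 *
              PySem.Int.powMod 2 b.toNat p) p)) cur).map
            (fun s => (s.length : Int))).sum then none
          else some (stepA p M ((PySem.List.pyRange 0 (M + 1) 1).map (fun b =>
            PySem.Int.mod (PySem.List.pyGetD u_pows (l + 1) 0 *
              PySem.Int.powMod 2 b.toNat p) p)) cur) := rfl
    have hB1 : bodyB u p M (some (coeff, d)) l
        = if 10000000 < (d.values.map (fun mb => M + 1 - mb)).sum then none
          else some (PySem.Int.mod (coeff * u) p,
            stepB p M ((PySem.List.pyRange 0 (M + 1) 1).map (fun b =>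
              PySem.Int.mod (PySem.Int.mod (coeff * u) p *
                PySem.Int.powMod 2 b.toNat p) p)) d) := rfl
    rw [hA1, hB1, hj, hcoeff']
    rw [totals_eq hp ((PySem.List.pyRange 0 (M + 1) 1).map (fun b =>
      PySem.Int.mod (PySem.Int.mod (u ^ (l + 1).toNat) p *
        PySem.Int.powMod 2 b.toNat p) p)) hinv]
    by_cases hg : 10000000 < (d.values.map (fun mb => M + 1 - mb)).sum
    · rw [if_pos hg, if_pos hg, foldl_bodyA_none, foldl_bodyB_none]
      exact Or.inl ⟨rfl, rfl⟩
    · rw [if_neg hg, if_neg hg]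
      exact ih (l + 1) (by omega) (by omega) _ _ _ (step_rel hp _ hinv) rfl


set_option maxHeartbeats 2000000 in
lemma main_core (k p M u t : Int) (hp : p ≠ 0) (hk : 2 ≤ k)
    (hu : PySem.Int.mod u p = u) :
    (match (PySem.List.pyRange 1 (k - 1) 1).foldl
        (bodyA ((PySem.List.pyRange 0 k 1).map (fun j => PySem.Int.powMod u j.toNat p)) p M)
        (some ((PySem.List.pyRange 0 (M + 1) 1).map (fun b => PySem.Set.add PySem.Set.empty
          (PySem.Int.mod (PySem.List.pyGetD ((PySem.List.pyRange 0 k 1).map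
            (fun j => PySem.Int.powMod u j.toNat p)) 1 0 * PySem.Int.powMod 2 b.toNat p) p)))) with
      | none => ((none : Option Bool), (none : Option Int))
      | some current =>
        (some (PySem.Set.contains (current.foldl (fun s cs => PySem.Set.update s cs)
          PySem.Set.empty) t),
         some (((current.foldl (fun s cs => PySem.Set.update s cs)
          PySem.Set.empty).length : Int))))
    = (match (PySem.List.pyRange 1 (k - 1) 1).foldl (bodyB u p M)
        (some (u, (PySem.List.pyRange 0 (M + 1) 1).foldl (fun d b =>
          if d.contains (PySem.Int.mod (u * PySem.Int.powMod 2 b.toNat p) p) then d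
          else d.insert (PySem.Int.mod (u * PySem.Int.powMod 2 b.toNat p) p) b)
          PySem.Dict.empty)) with
      | none => ((none : Option Bool), (none : Option Int))
      | some st => (some (st.2.contains t), some ((st.2.size : Int)))) := by
  have hup : ∀ j : Int, 0 ≤ j → j < k →
      PySem.List.pyGetD ((PySem.List.pyRange 0 k 1).map
        (fun j => PySem.Int.powMod u j.toNat p)) j 0 = PySem.Int.mod (u ^ j.toNat) p := by
    intro j h0 hj
    rw [PySem.List.pyGetD_map_pyRange_of_nonneg _ k j 0 h0 hj]
    rfl
  have hcoeff0 : PySem.List.pyGetD ((PySem.List.pyRange 0 k 1).map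
      (fun j => PySem.Int.powMod u j.toNat p)) 1 0 = u := by
    rw [hup 1 (by omega) (by omega)]
    simpa using hu
  rw [hcoeff0]
  have hinv0 : InvLD p M
      ((PySem.List.pyRange 0 (M + 1) 1).map (fun b => PySem.Set.add PySem.Set.empty
        (PySem.Int.mod (u * PySem.Int.powMod 2 b.toNat p) p)))
      ((PySem.List.pyRange 0 (M + 1) 1).foldl (fun d b =>
        if d.contains (PySem.Int.mod (u * PySem.Int.powMod 2 b.toNat p) p) then d
        else d.insert (PySem.Int.mod (u * PySem.Int.powMod 2 b.toNat p) p) b)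
        PySem.Dict.empty) :=
    init_rel hp (fun b => PySem.Int.mod (u * PySem.Int.powMod 2 b.toNat p) p)
      (fun b => canon_mod p _ hp)
  have hc0 : (u : Int) = PySem.Int.mod (u ^ (1 : Int).toNat) p := by
    simpa using hu.symm
  rcases loop_rel u p M ((PySem.List.pyRange 0 k 1).map
      (fun j => PySem.Int.powMod u j.toNat p)) k hp hup (k - 2).toNat 1 (by omega) (by omega)
      _ _ u hinv0 hc0 with ⟨h1, h2⟩ | ⟨cur, c, d, h1, h2, hinv⟩
  · rw [h1, h2]
  · rw [h1, h2]
    obtain ⟨hcont, hlen⟩ := final_eq hp hinv t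
    simp only [hcont, hlen]

-- ===== VERDICT (by name: the statement is the Claim_ definition above) =====
theorem dp_check_target_fast_spec : Claim_equal_dp_check_target_fast := by
  intro k p M target _ hpre
  obtain ⟨hp, h3, hk⟩ := hpre
  unfold Spec_dp_check_target_fast
  unfold dp_check_target_fast dp_check_target_fast_alt compute_u
  by_cases hbig : 2000000 < p
  · simp [hbig]
  · simp only [if_neg hbig]
    have hk2 : 2 ≤ k := by omega
    exact main_core k p M (PySem.Int.mod (2 * pyInvMod 3 p) p)
      (target.getD (PySem.Int.mod (-1) p)) hp hk2 (mod_idem p _ hp)
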